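-- pv_equiv track=rewrite | github.com/sueszli/vector-database-benchmark | dataset/python-mutated/tokenization_tapas.py | get_all_spans
-- ===== SOURCE A (Python) =====
-- def get_all_spans(text, max_ngram_length):
--     if False:
--         i = 10
--         return i + 15
--     "\n    Split a text into all possible ngrams up to 'max_ngram_length'. Split points are white space and punctuation.\n\n    Args:\n      text: Text to split.\n      max_ngram_length: maximal ngram length.\n    Yields:\n      Spans, tuples of begin-end index.\n    "
--     start_indexes = []
--     for (index, char) in enumerate(text):
--         if not char.isalnum():
--             continue
--         if index == 0 or not text[index - 1].isalnum():
--             start_indexes.append(index)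
--         if index + 1 == len(text) or not text[index + 1].isalnum():
--             for start_index in start_indexes[-max_ngram_length:]:
--                 yield (start_index, index + 1)
-- ===== SOURCE B (Python) =====
-- def get_all_spans(text, max_ngram_length):
--     # Two-pass: first collect the word (start, end) spans, then emit the
--     # ngram spans per ending word from the word list.
--     words = []
--     start = None
--     for i, ch in enumerate(text):
--         if ch.isalnum():
--             if start is None:
--                 start = i
--         elif start is not None:
--             words.append((start, i))
--             start = None
--     if start is not None:
--         words.append((start, len(text)))
--     starts = [w[0] for w in words]
--     for j, (_, end) in enumerate(words):
--         for s in starts[:j + 1][-max_ngram_length:]: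
--             yield (s, end)
-- ===== Notes on version B (the rewrite author's own statement) =====
-- stated objective: alternative
-- what changed: B replaces A's single pass with per-character lookbehind/lookahead indexing by a two-pass scheme: first build the list of maximal alnum-word (start,end) spans, then emit, for each ending word, the spans from the last max_ngram_length word starts.
import Mathlib
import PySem

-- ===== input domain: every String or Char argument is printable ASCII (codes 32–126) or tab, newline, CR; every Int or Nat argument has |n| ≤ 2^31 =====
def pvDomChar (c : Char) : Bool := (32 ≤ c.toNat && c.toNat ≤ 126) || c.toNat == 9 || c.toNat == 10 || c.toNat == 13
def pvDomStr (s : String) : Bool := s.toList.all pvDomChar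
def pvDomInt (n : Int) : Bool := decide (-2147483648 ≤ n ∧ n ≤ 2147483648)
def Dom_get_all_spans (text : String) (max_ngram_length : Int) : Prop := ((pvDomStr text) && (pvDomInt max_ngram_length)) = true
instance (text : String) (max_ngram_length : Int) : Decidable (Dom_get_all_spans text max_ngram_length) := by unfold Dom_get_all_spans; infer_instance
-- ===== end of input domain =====

-- B rebuilds the same ngram spans from a first-pass word list instead of A's
-- in-loop lookbehind/lookahead indexing; alternative decomposition, same cost.
-- Both functions are Python generators; equivalence is about the yielded sequence.

-- ===== PORT A =====
def get_all_spans (text : String) (max_ngram_length : Int) : List (Int × Int) :=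
  let cs := text.toList
  ((PySem.List.enumerate cs 0).foldl
    (fun (st : List Int × List (Int × Int)) (p : Int × Char) =>
      if !(PySem.Chars.isalnum p.2) then st
      else
        let starts :=
          if p.1 == 0 || !(PySem.Chars.isalnum ((PySem.List.pyGet? cs (p.1 - 1)).getD ' '))
          then st.1 ++ [p.1] else st.1
        let out :=
          if p.1 + 1 == (cs.length : Int) || !(PySem.Chars.isalnum ((PySem.List.pyGet? cs (p.1 + 1)).getD ' '))
          then st.2 ++ (PySem.List.slice starts (some (-max_ngram_length)) none).map (fun s => (s, p.1 + 1))
          else st.2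
        (starts, out))
    ([], [])).2

-- ===== PORT B =====
def get_all_spans_alt (text : String) (max_ngram_length : Int) : List (Int × Int) :=
  let cs := text.toList
  let st := (PySem.List.enumerate cs 0).foldl
    (fun (st : List (Int × Int) × Option Int) (p : Int × Char) =>
      if PySem.Chars.isalnum p.2 then (st.1, some (st.2.getD p.1))
      else match st.2 with
        | some s => (st.1 ++ [(s, p.1)], none)
        | none => st)
    ([], none)
  let words := match st.2 with
    | some s => st.1 ++ [(s, (cs.length : Int))]
    | none => st.1
  let starts := words.map (·.1)
  (PySem.List.enumerate words 0).foldl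
    (fun out (p : Int × (Int × Int)) =>
      out ++ (PySem.List.slice (PySem.List.slice starts none (some (p.1 + 1)))
                (some (-max_ngram_length)) none).map (fun s => (s, p.2.2)))
    []

-- ===== PRECONDITION & SPEC =====
def Spec_get_all_spans (text : String) (max_ngram_length : Int) (out : List (Int × Int)) : Prop := out = get_all_spans_alt text max_ngram_length
instance (text : String) (max_ngram_length : Int) (out : List (Int × Int)) : Decidable (Spec_get_all_spans text max_ngram_length out) := by unfold Spec_get_all_spans; infer_instance

-- ===== CLAIM (what is proved, stated in full; the proofs are below) =====
def Claim_equal_get_all_spans : Prop := ∀ (text : String) (max_ngram_length : Int), Dom_get_all_spans text max_ngram_length → Spec_get_all_spans text max_ngram_length (get_all_spans text max_ngram_length)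

-- ===== LEMMAS AND PROOFS =====

def tailAl : List Char → Bool
  | [] => false
  | d :: _ => PySem.Chars.isalnum d

def spanE (m : Int) : List Char → Int → Bool → List Int → List (Int × Int)
  | [], _, _, _ => []
  | c :: rest, n, prev, starts =>
    if PySem.Chars.isalnum c then
      let starts' := if !prev then starts ++ [n] else starts
      (if !(tailAl rest) then (PySem.List.slice starts' (some (-m)) none).map (fun s => (s, n + 1)) else []) ++
        spanE m rest (n + 1) true starts'
    else spanE m rest (n + 1) false starts

def wordsB : List Char → Int → Option Int → List (Int × Int)
  | [], _, none => []
  | [], n, some s => [(s, n)]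
  | c :: rest, n, none =>
    if PySem.Chars.isalnum c then wordsB rest (n + 1) (some n) else wordsB rest (n + 1) none
  | c :: rest, n, some s =>
    if PySem.Chars.isalnum c then wordsB rest (n + 1) (some s) else (s, n) :: wordsB rest (n + 1) none

def spanG (m : Int) : List Int → List (Int × Int) → List (Int × Int)
  | _, [] => []
  | starts, (s, e) :: ws =>
    (PySem.List.slice (starts ++ [s]) (some (-m)) none).map (fun x => (x, e)) ++
      spanG m (starts ++ [s]) ws

lemma spanE_cons (m : Int) (c : Char) (rest : List Char) (n : Int) (prev : Bool)
    (starts : List Int) :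
    spanE m (c :: rest) n prev starts =
    if PySem.Chars.isalnum c then
      (if !(tailAl rest) then
        (PySem.List.slice (if !prev then starts ++ [n] else starts) (some (-m)) none).map
          (fun s => (s, n + 1)) else []) ++
        spanE m rest (n + 1) true (if !prev then starts ++ [n] else starts)
    else spanE m rest (n + 1) false starts := rfl

lemma lemA (m : Int) (cs : List Char) : ∀ (suf : List Char) (k : Nat),
    cs.drop k = suf → ∀ (starts : List Int) (out : List (Int × Int)),
    ((PySem.List.enumerate suf (k : Int)).foldl
      (fun (st : List Int × List (Int × Int)) (p : Int × Char) =>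
        if !(PySem.Chars.isalnum p.2) then st
        else
          let starts :=
            if p.1 == 0 || !(PySem.Chars.isalnum ((PySem.List.pyGet? cs (p.1 - 1)).getD ' '))
            then st.1 ++ [p.1] else st.1
          let out :=
            if p.1 + 1 == (cs.length : Int) || !(PySem.Chars.isalnum ((PySem.List.pyGet? cs (p.1 + 1)).getD ' '))
            then st.2 ++ (PySem.List.slice starts (some (-m)) none).map (fun s => (s, p.1 + 1))
            else st.2
          (starts, out))
      (starts, out)).2
    = out ++ spanE m suf (k : Int)
        (decide (k ≠ 0) && PySem.Chars.isalnum ((PySem.List.pyGet? cs ((k : Int) - 1)).getD ' ')) starts := by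
  intro suf
  induction suf with
  | nil => intro k hdrop starts out; simp [PySem.List.enumerate_nil, spanE]
  | cons c rest ih =>
    intro k hdrop starts out
    have hk : k < cs.length := by
      by_contra hk'
      have : cs.drop k = [] := List.drop_eq_nil_of_le (by omega)
      rw [hdrop] at this; simp at this
    have hget : cs[k]? = some c := by
      have h := congrArg List.head? hdrop
      rwa [List.head?_drop] at h
    have hdrop1 : cs.drop (k + 1) = rest := by
      have h := congrArg List.tail hdrop
      rwa [List.tail_drop] at h
    have hcast : ((k : Int) + 1) = (((k + 1 : Nat)) : Int) := by push_cast; ring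
    have hpyk : PySem.List.pyGet? cs ((k : Int)) = some c := by
      rw [PySem.List.pyGet?_natCast]; exact hget
    rw [PySem.List.enumerate_cons, List.foldl_cons]
    by_cases hc : PySem.Chars.isalnum c = true
    · -- alnum char
      have hprev' : (decide (k + 1 ≠ 0) &&
          PySem.Chars.isalnum ((PySem.List.pyGet? cs (((k + 1 : Nat) : Int) - 1)).getD ' ')) = true := by
        have : (((k + 1 : Nat) : Int) - 1) = (k : Int) := by push_cast; ring
        simp [hpyk, hc]
      have hprevcond : (((k : Int)) == 0 ||
            !(PySem.Chars.isalnum ((PySem.List.pyGet? cs ((k : Int) - 1)).getD ' ')))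
          = !(decide (k ≠ 0) && PySem.Chars.isalnum ((PySem.List.pyGet? cs ((k : Int) - 1)).getD ' ')) := by
        by_cases hk0 : k = 0 <;> simp [hk0]
      have hemitcond : (((k : Int)) + 1 == (cs.length : Int) ||
            !(PySem.Chars.isalnum ((PySem.List.pyGet? cs ((k : Int) + 1)).getD ' ')))
          = !(tailAl rest) := by
        cases rest with
        | nil =>
          have hlen : cs.length = k + 1 := by
            have := congrArg List.length hdrop
            simp [List.length_drop] at this
            omega
          simp [hlen, tailAl]
        | cons d rest2 =>
          have hget1 : cs[k + 1]? = some d := by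
            have h := congrArg List.head? hdrop1
            rwa [List.head?_drop] at h
          have hlt : k + 1 < cs.length := by
            by_contra hx
            have : cs.drop (k + 1) = [] := List.drop_eq_nil_of_le (by omega)
            rw [hdrop1] at this; simp at this
          have hne : ¬ ((k : Int) + 1 = (cs.length : Int)) := by omega
          have hpyk1 : PySem.List.pyGet? cs ((k : Int) + 1) = some d := by
            rw [hcast, PySem.List.pyGet?_natCast]; exact hget1
          simp [hpyk1, hne, tailAl]
      rw [if_neg (by simp [hc]), hcast]
      dsimp only
      rw [ih (k + 1) hdrop1, hprev', ← hcast]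
      conv_rhs => rw [spanE_cons]
      rw [if_pos hc, hprevcond, hemitcond]
      split_ifs <;> simp
    · -- not alnum
      have hprev' : (decide (k + 1 ≠ 0) &&
          PySem.Chars.isalnum ((PySem.List.pyGet? cs (((k + 1 : Nat) : Int) - 1)).getD ' ')) = false := by
        have : (((k + 1 : Nat) : Int) - 1) = (k : Int) := by push_cast; ring
        simp [hpyk, hc]
      rw [if_pos (by simp [hc]), hcast, ih (k + 1) hdrop1, hprev']
      conv_rhs => rw [spanE_cons]
      rw [if_neg hc, ← hcast]

lemma lemB1 : ∀ (suf : List Char) (k : Int) (ws : List (Int × Int)) (pend : Option Int),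
    (let r := (PySem.List.enumerate suf k).foldl
      (fun (st : List (Int × Int) × Option Int) (p : Int × Char) =>
        if PySem.Chars.isalnum p.2 then (st.1, some (st.2.getD p.1))
        else match st.2 with
          | some s => (st.1 ++ [(s, p.1)], none)
          | none => st)
      (ws, pend)
     match r.2 with
     | some s => r.1 ++ [(s, k + suf.length)]
     | none => r.1)
    = ws ++ wordsB suf k pend := by
  intro suf
  induction suf with
  | nil =>
    intro k ws pend
    cases pend <;> simp [PySem.List.enumerate_nil, wordsB]
  | cons c rest ih =>
    intro k ws pend
    rw [PySem.List.enumerate_cons]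
    have hl : k + ((c :: rest).length : Int) = (k + 1) + (rest.length : Int) := by
      simp; ring
    by_cases hc : PySem.Chars.isalnum c = true
    · cases pend with
      | none =>
        simp only [List.foldl_cons, hc, if_pos, Option.getD_none, hl]
        rw [ih (k + 1) ws (some k)]
        simp [wordsB, hc]
      | some s =>
        simp only [List.foldl_cons, hc, if_pos, Option.getD_some, hl]
        rw [ih (k + 1) ws (some s)]
        simp [wordsB, hc]
    · cases pend with
      | none =>
        simp only [List.foldl_cons, hc, if_neg, Bool.not_eq_true, hl]
        rw [ih (k + 1) ws none]
        simp [wordsB, hc]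
      | some s =>
        simp only [List.foldl_cons, hc, if_neg, Bool.not_eq_true, hl]
        rw [ih (k + 1) (ws ++ [(s, k)]) none]
        simp [wordsB, hc]

lemma lemB2 (m : Int) (starts0 : List Int) : ∀ (ws : List (Int × Int)) (ps : List Int),
    starts0 = ps ++ ws.map (·.1) → ∀ (acc : List (Int × Int)),
    (PySem.List.enumerate ws (ps.length : Int)).foldl
      (fun out (p : Int × (Int × Int)) =>
        out ++ (PySem.List.slice (PySem.List.slice starts0 none (some (p.1 + 1)))
                  (some (-m)) none).map (fun s => (s, p.2.2)))
      acc
    = acc ++ spanG m ps ws := by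
  intro ws
  induction ws with
  | nil => intro ps h acc; simp [PySem.List.enumerate_nil, spanG]
  | cons w ws ih =>
    intro ps h acc
    obtain ⟨s, e⟩ := w
    rw [PySem.List.enumerate_cons, List.foldl_cons]
    have h1 : ((ps.length : Int) + 1) = ((ps.length + 1 : Nat) : Int) := by push_cast; ring
    have h2 : PySem.List.slice starts0 none (some ((ps.length : Int) + 1)) = ps ++ [s] := by
      rw [h1, PySem.List.slice_to_natCast, h]
      simp [List.take_append]
    dsimp only
    rw [h2]
    have hlen : ((ps.length : Int) + 1) = (((ps ++ [s]).length : Nat) : Int) := by simp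
    rw [hlen, ih (ps ++ [s]) (by simpa using h)]
    simp [spanG]

lemma central (m : Int) : ∀ (cs : List Char) (n : Int) (starts : List Int),
    (spanE m cs n false starts = spanG m starts (wordsB cs n none)) ∧
    (∀ s : Int, (match cs with | [] => False | c :: _ => PySem.Chars.isalnum c = true) →
      spanE m cs n true (starts ++ [s]) = spanG m starts (wordsB cs n (some s))) := by
  intro cs
  induction cs with
  | nil =>
    intro n starts
    exact ⟨by simp [spanE, wordsB, spanG], fun s h => h.elim⟩
  | cons c rest ih =>
    intro n starts
    constructor
    · by_cases hc : PySem.Chars.isalnum c = true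
      · cases rest with
        | nil => simp [spanE, tailAl, wordsB, spanG, hc]
        | cons d rest2 =>
          by_cases hd : PySem.Chars.isalnum d = true
          · have h2 := (ih (n + 1) starts).2 n (by simp [hd])
            have e : spanE m (c :: d :: rest2) n false starts
                = spanE m (d :: rest2) (n + 1) true (starts ++ [n]) := by
              simp [spanE, tailAl, hc, hd]
            have e2 : wordsB (c :: d :: rest2) n none = wordsB (d :: rest2) (n + 1) (some n) := by
              simp [wordsB, hc]
            rw [e, e2, h2]
          · have h1' : spanE m (d :: rest2) (n + 1) false (starts ++ [n])
                = spanG m (starts ++ [n]) (wordsB rest2 (n + 1 + 1) none) := by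
              rw [(ih (n + 1) (starts ++ [n])).1]
              congr 1
              simp [wordsB, hd]
            have e : spanE m (c :: d :: rest2) n false starts
                = (PySem.List.slice (starts ++ [n]) (some (-m)) none).map (fun s => (s, n + 1))
                  ++ spanE m (d :: rest2) (n + 1) false (starts ++ [n]) := by
              simp [spanE, tailAl, hc, hd]
            have e2 : wordsB (c :: d :: rest2) n none = (n, n + 1) :: wordsB rest2 (n + 1 + 1) none := by
              simp [wordsB, hc, hd]
            rw [e, e2, h1']
            simp [spanG]
      · have e : spanE m (c :: rest) n false starts = spanE m rest (n + 1) false starts := by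
          simp [spanE, hc]
        have e2 : wordsB (c :: rest) n none = wordsB rest (n + 1) none := by
          simp [wordsB, hc]
        rw [e, e2, (ih (n + 1) starts).1]
    · intro s h
      simp only at h
      by_cases hc : PySem.Chars.isalnum c = true
      · cases rest with
        | nil => simp [spanE, tailAl, wordsB, spanG, hc]
        | cons d rest2 =>
          by_cases hd : PySem.Chars.isalnum d = true
          · have h2 := (ih (n + 1) starts).2 s (by simp [hd])
            have e : spanE m (c :: d :: rest2) n true (starts ++ [s])
                = spanE m (d :: rest2) (n + 1) true (starts ++ [s]) := by
              simp [spanE, tailAl, hc, hd]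
            have e2 : wordsB (c :: d :: rest2) n (some s) = wordsB (d :: rest2) (n + 1) (some s) := by
              simp [wordsB, hc]
            rw [e, e2, h2]
          · have h1' : spanE m (d :: rest2) (n + 1) false (starts ++ [s])
                = spanG m (starts ++ [s]) (wordsB rest2 (n + 1 + 1) none) := by
              rw [(ih (n + 1) (starts ++ [s])).1]
              congr 1
              simp [wordsB, hd]
            have e : spanE m (c :: d :: rest2) n true (starts ++ [s])
                = (PySem.List.slice (starts ++ [s]) (some (-m)) none).map (fun x => (x, n + 1))
                  ++ spanE m (d :: rest2) (n + 1) false (starts ++ [s]) := by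
              simp [spanE, tailAl, hc, hd]
            have e2 : wordsB (c :: d :: rest2) n (some s) = (s, n + 1) :: wordsB rest2 (n + 1 + 1) none := by
              simp [wordsB, hc, hd]
            rw [e, e2, h1']
            simp [spanG]
      · exact absurd h hc

lemma sideA (m : Int) (text : String) :
    get_all_spans text m = spanE m text.toList 0 false [] := by
  unfold get_all_spans
  have h := lemA m text.toList text.toList 0 rfl [] []
  simpa using h

lemma sideB (m : Int) (text : String) :
    get_all_spans_alt text m = spanG m [] (wordsB text.toList 0 none) := by
  unfold get_all_spans_alt
  have h1 := lemB1 text.toList 0 [] none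
  dsimp only at h1 ⊢
  simp only [zero_add, List.nil_append] at h1
  rw [h1]
  have h2 := lemB2 m ((wordsB text.toList 0 none).map (·.1)) (wordsB text.toList 0 none) [] (by simp) []
  simpa using h2

-- ===== VERDICT (by name: the statement is the Claim_ definition above) =====
theorem get_all_spans_spec : Claim_equal_get_all_spans := by
  intro text m _
  unfold Spec_get_all_spans
  rw [sideA, sideB, (central m text.toList 0 []).1]
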